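-- pv_equiv track=rewrite | github.com/shresth-keshari/CodewarsV5 | freshers/Nggs_in_Pune_freshers_24B4522@iitb.ac.in.py | fill_blanks
-- ===== SOURCE A (Python) =====
-- def fill_blanks(target_list: list, source_list: list):
--     target_set = set(target_list) - {" "}  # Track existing elements, ignoring blanks
--     source_index = 0  # Track position in source_list
--     existing_entries = []  # List for non-blank existing elements
--     new_entries = []  # List for newly filled elements
--     blank_count = 0  # Count blanks that can't be filled
--
--     # Process target_list and replace blanks
--     for item in target_list:
--         if item == " ":  # If it's a blank, try to replace it
--             while source_index < len(source_list) and (source_list[source_index] in target_set or source_list[source_index] == " "):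
--                 source_index += 1  # Skip existing elements and blanks
--
--             if source_index < len(source_list):  # If a valid element is found
--                 new_entries.append(source_list[source_index])  # Fill blank
--                 target_set.add(source_list[source_index])  # Add to uniqueness check
--                 source_index += 1  # Move to next source element
--             else:
--                 blank_count += 1  # No valid replacement, keep blank
--         else:
--             existing_entries.append(item)  # Keep existing elements
--
--     # Return list with remaining blanks at the start, then existing elements, then new ones
--     return [" "] * blank_count + existing_entries + new_entries
-- ===== SOURCE B (Python) =====
-- def fill_blanks(target_list: list, source_list: list):
--     existing = [x for x in target_list if x != " "]
--     num_blanks = len(target_list) - len(existing)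
--     existing_set = set(existing)
--     # stateless pipeline: order-preserving dedup of the whole source, then filter, then slice
--     pool = [x for x in dict.fromkeys(source_list) if x != " " and x not in existing_set]
--     new_entries = pool[:num_blanks]
--     return [" "] * (num_blanks - len(new_entries)) + existing + new_entries
-- ===== Notes on version B (the rewrite author's own statement) =====
-- stated objective: simpler
-- what changed: A interleaves a loop over the target with a nested index-scan of the source while mutating a seen-set as blanks get filled; B is a stateless three-stage pipeline: dedup the whole source with dict.fromkeys, filter out blanks and target members with a pure comprehension, and slice the first num_blanks elements.
import Mathlib
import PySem

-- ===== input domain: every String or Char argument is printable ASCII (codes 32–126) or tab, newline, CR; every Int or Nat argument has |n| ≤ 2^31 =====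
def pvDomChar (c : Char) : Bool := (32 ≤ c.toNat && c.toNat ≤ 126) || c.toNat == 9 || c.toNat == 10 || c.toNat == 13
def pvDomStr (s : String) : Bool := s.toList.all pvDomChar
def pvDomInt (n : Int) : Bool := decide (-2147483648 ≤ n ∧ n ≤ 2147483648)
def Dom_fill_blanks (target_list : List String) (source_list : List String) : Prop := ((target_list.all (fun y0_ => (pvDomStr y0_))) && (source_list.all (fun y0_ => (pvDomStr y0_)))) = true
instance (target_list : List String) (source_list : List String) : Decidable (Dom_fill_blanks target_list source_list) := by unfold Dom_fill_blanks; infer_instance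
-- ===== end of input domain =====

-- B replaces A's interleaved target-loop with nested source scanning and a mutable seen-set
-- by a stateless pipeline: dict.fromkeys-dedup of the whole source, pure filter, slice;
-- objective: simpler. Proved: equal return value on all inputs.


-- ===== PORT A =====
-- the inner 'while source_index < len(source_list) and (source_list[source_index] in target_set or source_list[source_index] == " ")'
def fbSkip (src : List String) (tset : PySem.Set String) (i : Nat) : Nat :=
  if h : i < src.length then
    if PySem.Set.contains tset src[i] || src[i] == " " then fbSkip src tset (i + 1) else i
  else i
termination_by src.length - i

-- one iteration of A's 'for item in target_list' loop; state = (source_index, target_set, existing_entries, new_entries, blank_count)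
def fbStep (src : List String)
    (st : Nat × PySem.Set String × List String × List String × Nat) (item : String) :
    Nat × PySem.Set String × List String × List String × Nat :=
  let (i, tset, ex, ne, bc) := st
  if item == " " then
    let j := fbSkip src tset i
    if h : j < src.length then
      (j + 1, PySem.Set.add tset src[j], ex, ne ++ [src[j]], bc)
    else
      (j, tset, ex, ne, bc + 1)
  else
    (i, tset, ex ++ [item], ne, bc)

def fill_blanks (target_list : List String) (source_list : List String) : List String :=
  let tset := PySem.Set.diff (PySem.Set.ofList target_list) (PySem.Set.ofList [" "])
  let st := target_list.foldl (fbStep source_list) (0, tset, [], [], 0)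
  List.replicate st.2.2.2.2 " " ++ st.2.2.1 ++ st.2.2.2.1

-- ===== PORT B =====
-- Source B: existing/num_blanks/existing_set, then pool = [x for x in dict.fromkeys(source_list) if …]
-- (dict.fromkeys as ordered dedup is PySem.List.dedup), then pool[:num_blanks] = take (0 ≤ num_blanks)
def fill_blanks_alt (target_list : List String) (source_list : List String) : List String :=
  let existing := target_list.filter (fun x => x != " ")
  let numBlanks := target_list.length - existing.length
  let existingSet := PySem.Set.ofList existing
  let pool := (PySem.List.dedup source_list).filter (fun x => x != " " && !(PySem.Set.contains existingSet x))
  let newEntries := pool.take numBlanks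
  List.replicate (numBlanks - newEntries.length) " " ++ existing ++ newEntries

-- ===== PRECONDITION & SPEC =====
def Spec_fill_blanks (target_list : List String) (source_list : List String) (out : List String) : Prop := out = fill_blanks_alt target_list source_list
instance (target_list : List String) (source_list : List String) (out : List String) : Decidable (Spec_fill_blanks target_list source_list out) := by unfold Spec_fill_blanks; infer_instance

-- ===== CLAIM (what is proved, stated in full; the proofs are below) =====
def Claim_equal_fill_blanks : Prop := ∀ (target_list : List String) (source_list : List String), Dom_fill_blanks target_list source_list → Spec_fill_blanks target_list source_list (fill_blanks target_list source_list)

-- ===== LEMMAS AND PROOFS =====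

-- A's pick loop, abstracted: process k blanks, returning (new_entries, unfilled blank count)
def pickA (src : List String) (tset : PySem.Set String) (i : Nat) : Nat → List String × Nat
  | 0 => ([], 0)
  | k + 1 =>
    let j := fbSkip src tset i
    if h : j < src.length then
      let p := pickA src (PySem.Set.add tset src[j]) (j + 1) k
      (src[j] :: p.1, p.2)
    else
      let p := pickA src tset j k
      (p.1, p.2 + 1)

-- the first-occurrence stream A draws its picks from: skip blanks and seen values, record picks
def fbStream (seen : PySem.Set String) : List String → List String
  | [] => []
  | x :: xs =>
    if x == " " || PySem.Set.contains seen x then fbStream seen xs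
    else x :: fbStream (PySem.Set.add seen x) xs

-- prefix of fbStream of a given length (A's picks for k blanks)
def fbPick (src : List String) (seen : PySem.Set String) (k : Nat) : List String :=
  (fbStream seen src).take k

-- head-recursive form of PySem.List.dedup
def fbDD (ded : PySem.Set String) : List String → List String
  | [] => []
  | x :: xs => if PySem.Set.contains ded x then fbDD ded xs else x :: fbDD (PySem.Set.add ded x) xs

lemma fbSkip_ge (src : List String) (tset : PySem.Set String) (i : Nat) : i ≤ fbSkip src tset i := by
  unfold fbSkip
  split
  · split
    · exact le_trans (Nat.le_succ i) (fbSkip_ge src tset (i + 1))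
    · exact le_refl i
  · exact le_refl i
termination_by src.length - i

lemma fbSkip_stop (src : List String) (tset : PySem.Set String) (i j : Nat)
    (heq : fbSkip src tset i = j) (hj : j < src.length) :
    (PySem.Set.contains tset src[j] || src[j] == " ") = false := by
  rw [fbSkip] at heq
  split at heq
  next h =>
    split at heq
    next hc => exact fbSkip_stop src tset (i + 1) j heq hj
    next hc => subst heq; simpa using hc
  next h => omega
termination_by src.length - i

lemma fbSkip_of_ge (src : List String) (tset : PySem.Set String) (i : Nat)
    (h : ¬ i < src.length) : fbSkip src tset i = i := by
  unfold fbSkip; simp [h]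

lemma pickA_exhausted (src : List String) (tset : PySem.Set String) (i : Nat)
    (h : ¬ i < src.length) : ∀ k, pickA src tset i k = ([], k) := by
  intro k
  induction k with
  | zero => simp [pickA]
  | succ n ih => simp [pickA, fbSkip_of_ge src tset i h, h, ih]

lemma pickA_snd (src : List String) : ∀ (k : Nat) (tset : PySem.Set String) (i : Nat),
    (pickA src tset i k).2 = k - (pickA src tset i k).1.length := by
  intro k
  induction k with
  | zero => intro tset i; simp [pickA]
  | succ n ih =>
    intro tset i
    simp only [pickA]
    split
    next h => simp [ih]
    next h => simp [pickA_exhausted src tset _ h]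

-- skipped source elements are also skipped by fbStream's scan
lemma fbPick_skip (src : List String) (seen tset : PySem.Set String)
    (hm : ∀ x, PySem.Set.contains tset x = PySem.Set.contains seen x) (k : Nat) (i : Nat) :
    fbPick (src.drop i) seen k = fbPick (src.drop (fbSkip src tset i)) seen k := by
  unfold fbSkip
  split
  next h =>
    split
    next hc =>
      have hdrop : src.drop i = src[i] :: src.drop (i + 1) := List.drop_eq_getElem_cons h
      have hstep : fbPick (src.drop i) seen k = fbPick (src.drop (i + 1)) seen k := by
        rw [hdrop]
        have hcond : (src[i] == " " || PySem.Set.contains seen src[i]) = true := by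
          rw [← hm]
          cases h1 : (src[i] == " ") <;> cases h2 : PySem.Set.contains tset src[i] <;>
            simp_all
        simp only [fbPick, fbStream, hcond, if_true]
      rw [hstep]
      exact fbPick_skip src seen tset hm k (i + 1)
    next hc => rfl
  next h => rfl
termination_by src.length - i

lemma contains_add_eq (s : PySem.Set String) (x y : String) :
    PySem.Set.contains (PySem.Set.add s x) y = (PySem.Set.contains s y || y == x) := by
  by_cases h1 : y ∈ s <;> by_cases h2 : y = x <;>
    simp [PySem.Set.mem_add, h1, h2, PySem.Set.contains_eq_listContains]

lemma not_mem_of_contains_false {s : PySem.Set String} {x : String}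
    (h : PySem.Set.contains s x = false) : x ∉ s :=
  fun hx => by rw [(PySem.Set.contains_iff s x).2 hx] at h; exact Bool.noConfusion h

lemma contains_congr (s t : PySem.Set String) (h : ∀ y, y ∈ s ↔ y ∈ t) (x : String) :
    PySem.Set.contains s x = PySem.Set.contains t x := by
  cases hs : PySem.Set.contains s x <;> cases ht : PySem.Set.contains t x <;> try rfl
  · exact absurd ((h x).2 ((PySem.Set.contains_iff t x).1 ht)) (not_mem_of_contains_false hs)
  · exact absurd ((h x).1 ((PySem.Set.contains_iff s x).1 hs)) (not_mem_of_contains_false ht)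

-- fbStream (a take-prefix of which is fbPick) computes exactly the elements A picks
lemma fbPick_eq_pickA (src : List String) : ∀ (k : Nat) (i : Nat) (seen tset : PySem.Set String),
    (∀ x, PySem.Set.contains tset x = PySem.Set.contains seen x) →
    fbPick (src.drop i) seen k = (pickA src tset i k).1 := by
  intro k
  induction k with
  | zero =>
    intro i seen tset hm
    simp [fbPick, pickA]
  | succ n ih =>
    intro i seen tset hm
    rw [fbPick_skip src seen tset hm (n + 1) i]
    simp only [pickA]
    split
    next h =>
      have hdrop : src.drop (fbSkip src tset i) = src[fbSkip src tset i] :: src.drop (fbSkip src tset i + 1) :=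
        List.drop_eq_getElem_cons h
      have hstop := fbSkip_stop src tset i (fbSkip src tset i) rfl h
      have hnotc : PySem.Set.contains tset src[fbSkip src tset i] = false := by
        cases hh : PySem.Set.contains tset src[fbSkip src tset i] <;> simp_all
      have hnotb : (src[fbSkip src tset i] == " ") = false := by
        cases hh : (src[fbSkip src tset i] == " ") <;> simp_all
      have hcond : (src[fbSkip src tset i] == " " ||
          PySem.Set.contains seen src[fbSkip src tset i]) = false := by
        rw [← hm, hnotb, hnotc]; rfl
      rw [hdrop]
      simp only [fbPick, fbStream, hcond, Bool.false_eq_true, if_false, List.take_succ_cons]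
      congr 1
      exact ih (fbSkip src tset i + 1) (PySem.Set.add seen src[fbSkip src tset i])
        (PySem.Set.add tset src[fbSkip src tset i])
        (fun x => by rw [contains_add_eq, contains_add_eq, hm])
    next h =>
      have hd : src.drop (fbSkip src tset i) = [] := List.drop_eq_nil_of_le (by omega)
      rw [hd]
      simp [fbPick, fbStream, pickA_exhausted src tset _ h]

-- A's fold over target_list, characterized by the three output components
lemma foldA_char (src : List String) : ∀ (t : List String) (i : Nat) (tset : PySem.Set String)
    (ex ne : List String) (bc : Nat),
    (t.foldl (fbStep src) (i, tset, ex, ne, bc)).2.2.1 = ex ++ t.filter (fun x => x != " ") ∧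
    (t.foldl (fbStep src) (i, tset, ex, ne, bc)).2.2.2.1
        = ne ++ (pickA src tset i (t.count " ")).1 ∧
    (t.foldl (fbStep src) (i, tset, ex, ne, bc)).2.2.2.2
        = bc + (pickA src tset i (t.count " ")).2 := by
  intro t
  induction t with
  | nil => intro i tset ex ne bc; simp [pickA]
  | cons a t ih =>
    intro i tset ex ne bc
    by_cases ha : a = " "
    · subst ha
      have hcount : ((" " : String) :: t).count " " = t.count " " + 1 := by
        simp
      simp only [List.foldl_cons, fbStep, beq_self_eq_true, if_true, hcount, pickA]
      split
      next h =>
        obtain ⟨h1, h2, h3⟩ := ih (fbSkip src tset i + 1)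
          (PySem.Set.add tset src[fbSkip src tset i]) ex
          (ne ++ [src[fbSkip src tset i]]) bc
        refine ⟨by simpa using h1, ?_, by simpa using h3⟩
        rw [h2]; simp
      next h =>
        obtain ⟨h1, h2, h3⟩ := ih (fbSkip src tset i) tset ex ne (bc + 1)
        refine ⟨by simpa using h1, by simpa using h2, ?_⟩
        rw [h3]; ring
    · have hb : (a == " ") = false := by simpa using ha
      have hcount : (a :: t).count " " = t.count " " := by
        simp [ha]
      simp only [List.foldl_cons, fbStep, hb, Bool.false_eq_true, if_false, hcount]
      obtain ⟨h1, h2, h3⟩ := ih i tset (ex ++ [a]) ne bc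
      exact ⟨by simpa [List.filter_cons, ha] using h1, h2, h3⟩

lemma count_blank_eq (t : List String) :
    t.count " " = t.length - (t.filter (fun x => x != " ")).length := by
  induction t with
  | nil => simp
  | cons a t ih =>
    by_cases ha : a = " "
    · subst ha
      have hlen : (t.filter (fun x => x != " ")).length ≤ t.length := List.length_filter_le _ _
      simp [ih]
      omega
    · have hb : (a == " ") = false := by simpa using ha
      simp [ha, ih]

lemma contains_init_eq (t : List String) (x : String) :
    PySem.Set.contains (PySem.Set.diff (PySem.Set.ofList t) (PySem.Set.ofList [" "])) x
      = PySem.Set.contains (PySem.Set.ofList (t.filter (fun y => y != " "))) x := by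
  refine contains_congr _ _ (fun y => ?_) x
  rw [PySem.Set.mem_diff, PySem.Set.mem_ofList, PySem.Set.mem_ofList, PySem.Set.mem_ofList]
  simp [List.mem_filter]

-- dedup's foldl-of-add unrolled into the head recursion fbDD
lemma foldl_add_eq_fbDD (xs : List String) : ∀ (s : PySem.Set String),
    xs.foldl PySem.Set.add s = s ++ fbDD s xs := by
  induction xs with
  | nil => intro s; simp [fbDD]
  | cons x xs ih =>
    intro s
    by_cases hc : PySem.Set.contains s x = true
    · have hmem : x ∈ s := (PySem.Set.contains_iff s x).1 hc
      have hadd : PySem.Set.add s x = s := by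
        simp [PySem.Set.add, hmem]
      simp only [List.foldl_cons, hadd, fbDD, hc, if_true]
      exact ih s
    · have hc' : PySem.Set.contains s x = false := by
        cases h : PySem.Set.contains s x <;> simp_all
      have hmem : x ∉ s := not_mem_of_contains_false hc'
      have hadd : PySem.Set.add s x = s ++ [x] := by
        simp [PySem.Set.add, hmem]
      simp only [List.foldl_cons, fbDD, hc', Bool.false_eq_true, if_false]
      rw [ih (PySem.Set.add s x), hadd]
      simp

lemma dedup_eq_fbDD (xs : List String) : PySem.List.dedup xs = fbDD [] xs := by
  rw [PySem.List.dedup_eq_ofList, PySem.Set.ofList_eq_foldl, foldl_add_eq_fbDD]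
  simp

-- elements produced by fbDD never come from its 'already seen' set
lemma mem_fbDD_not_in (xs : List String) : ∀ (ded : PySem.Set String) (y : String),
    y ∈ fbDD ded xs → PySem.Set.contains ded y = false := by
  induction xs with
  | nil => intro ded y hy; simp [fbDD] at hy
  | cons x xs ih =>
    intro ded y hy
    simp only [fbDD] at hy
    split at hy
    · exact ih ded y hy
    · rcases List.mem_cons.1 hy with h | h
      · subst h
        cases hc : PySem.Set.contains ded y <;> simp_all
      · have := ih (PySem.Set.add ded x) y h
        rw [contains_add_eq] at this
        cases hc : PySem.Set.contains ded y <;> simp_all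

-- A's pick stream = dedup-then-filter (B's pool), relative to a dedup accumulator whose
-- elements are all blank or already seen
lemma fbStream_eq_filter_fbDD (src : List String) : ∀ (seen ded : PySem.Set String),
    (∀ y, y ∈ ded → y = " " ∨ PySem.Set.contains seen y = true) →
    fbStream seen src
      = (fbDD ded src).filter (fun x => x != " " && !(PySem.Set.contains seen x)) := by
  induction src with
  | nil => intro seen ded _; simp [fbStream, fbDD]
  | cons x xs ih =>
    intro seen ded hinv
    by_cases hval : (x == " " || PySem.Set.contains seen x) = true
    · -- x is skipped by A's stream
      simp only [fbStream, hval, if_true]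
      by_cases hd : PySem.Set.contains ded x = true
      · simp only [fbDD, hd, if_true]
        exact ih seen ded hinv
      · have hd' : PySem.Set.contains ded x = false := by
          cases h : PySem.Set.contains ded x <;> simp_all
        have hp : (x != " " && !(PySem.Set.contains seen x)) = false := by
          cases h1 : (x == " ") <;> cases h2 : PySem.Set.contains seen x <;> simp_all
        simp only [fbDD, hd', Bool.false_eq_true, if_false, List.filter_cons, hp]
        refine ih seen (PySem.Set.add ded x) (fun y hy => ?_)
        rw [PySem.Set.mem_add] at hy
        rcases hy with hy | hy
        · exact hinv y hy
        · subst hy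
          cases h1 : (y == " ")
          · right
            cases h2 : PySem.Set.contains seen y <;> simp_all
          · left; simpa using h1
    · -- x is picked by A's stream
      have hnb : (x == " ") = false := by
        cases h : (x == " ") <;> simp_all
      have hns : PySem.Set.contains seen x = false := by
        cases h : PySem.Set.contains seen x <;> simp_all
      have hd' : PySem.Set.contains ded x = false := by
        cases h : PySem.Set.contains ded x with
        | false => rfl
        | true =>
          rcases hinv x ((PySem.Set.contains_iff ded x).1 h) with h1 | h1
          · subst h1; simp at hnb
          · rw [h1] at hns; exact Bool.noConfusion hns
      simp only [fbStream, hnb, hns, Bool.or_self, Bool.false_eq_true, if_false,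
        fbDD, hd', List.filter_cons]
      rw [if_pos (by simpa using hnb)]
      rw [ih (PySem.Set.add seen x) (PySem.Set.add ded x) (fun y hy => by
        rw [PySem.Set.mem_add] at hy
        rcases hy with hy | hy
        · rcases hinv y hy with h1 | h1
          · exact Or.inl h1
          · right; rw [contains_add_eq, h1]; rfl
        · subst hy; right; rw [contains_add_eq]; simp)]
      congr 1
      refine List.filter_congr (fun y hy => ?_)
      have hyx : (y == x) = false := by
        have := mem_fbDD_not_in xs (PySem.Set.add ded x) y hy
        rw [contains_add_eq] at this
        cases h : (y == x) <;> simp_all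
      rw [contains_add_eq, hyx, Bool.or_false]

-- ===== VERDICT (by name: the statement is the Claim_ definition above) =====
theorem fill_blanks_spec : Claim_equal_fill_blanks := by
  intro t s _
  unfold Spec_fill_blanks fill_blanks fill_blanks_alt
  simp only []
  obtain ⟨h1, h2, h3⟩ := foldA_char s t 0
    (PySem.Set.diff (PySem.Set.ofList t) (PySem.Set.ofList [" "])) [] [] 0
  rw [h1, h2, h3]
  have hm := contains_init_eq t
  have hpick := fbPick_eq_pickA s (t.count " ") 0
    (PySem.Set.ofList (t.filter (fun y => y != " ")))
    (PySem.Set.diff (PySem.Set.ofList t) (PySem.Set.ofList [" "])) hm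
  have hpool : fbStream (PySem.Set.ofList (t.filter (fun y => y != " "))) s
      = (PySem.List.dedup s).filter
          (fun x => x != " " && !(PySem.Set.contains (PySem.Set.ofList (t.filter (fun y => y != " "))) x)) := by
    rw [fbStream_eq_filter_fbDD s _ [] (fun y hy => by simp at hy), ← dedup_eq_fbDD]
  have hcount := count_blank_eq t
  rw [List.drop_zero] at hpick
  unfold fbPick at hpick
  rw [← hcount, ← hpick, pickA_snd, ← hpick, hpool]
  simp
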